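-- pv_equiv track=rewrite | github.com/antoniofalcescu/advent-of-code-2023 | day-10-pipe-maze/main.py | find_inside_characters
-- ===== SOURCE A (Python) =====
-- def find_inside_characters(pipes):
--     inside = set()
--
--     for i in range(len(pipes)):
--         count = 0
--         for j in range(len(pipes[i])):
--             tile = pipes[i][j]
--             if tile in "|LJ":
--                 count += 1
--             elif tile == '.':
--                 if count % 2 != 0:
--                     inside.add((i, j))
--     return inside
-- ===== SOURCE B (Python) =====
-- def _bisect_left(a, x):
--     lo, hi = 0, len(a)
--     while lo < hi:
--         mid = (lo + hi) // 2
--         if a[mid] < x: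
--             lo = mid + 1
--         else:
--             hi = mid
--     return lo
--
--
-- def find_inside_characters(pipes):
--     inside = set()
--     for i, row in enumerate(pipes):
--         crossings = [j for j, tile in enumerate(row) if tile in "|LJ"]
--         for j, tile in enumerate(row):
--             if tile == '.' and _bisect_left(crossings, j) % 2 == 1:
--                 inside.add((i, j))
--     return inside
-- ===== Notes on version B (the rewrite author's own statement) =====
-- stated objective: alternative
-- what changed: Replaces the stateful running parity counter per row with a two-pass scheme: build a sorted index of the crossing columns once per row, then classify each dot tile by binary search (bisect_left) into that index, taking the parity of the number of crossings strictly to its left.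
import Mathlib
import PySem

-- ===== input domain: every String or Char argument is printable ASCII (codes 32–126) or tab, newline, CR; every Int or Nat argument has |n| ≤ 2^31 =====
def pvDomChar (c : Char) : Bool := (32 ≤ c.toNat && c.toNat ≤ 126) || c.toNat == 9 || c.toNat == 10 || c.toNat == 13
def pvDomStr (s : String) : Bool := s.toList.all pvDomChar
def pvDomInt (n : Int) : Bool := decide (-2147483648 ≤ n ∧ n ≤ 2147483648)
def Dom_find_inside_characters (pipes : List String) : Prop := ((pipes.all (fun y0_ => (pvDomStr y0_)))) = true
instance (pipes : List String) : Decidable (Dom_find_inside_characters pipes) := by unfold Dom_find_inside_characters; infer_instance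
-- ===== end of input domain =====

-- B replaces A's per-row running parity counter with a per-row sorted index of crossing columns
-- queried by binary search (bisect_left) for each dot (objective: alternative).

-- ===== PORT A =====
-- 'tile in "|LJ"' where tile is a single character is exactly membership in ['|','L','J'].
def pvIsCross (t : Char) : Bool := t ∈ ['|', 'L', 'J']

def find_inside_characters (pipes : List String) : List (Int × Int) :=
  (List.range pipes.length).foldl (fun (inside : PySem.Set (Int × Int)) i =>
    let cs := (pipes.getD i "").toList
    ((List.range cs.length).foldl (fun (st : PySem.Set (Int × Int) × Int) j =>
      if pvIsCross (cs.getD j ' ') then (st.1, st.2 + 1)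
      else if cs.getD j ' ' = '.' then
        if PySem.Int.mod st.2 2 ≠ 0 then (PySem.Set.add st.1 ((i : Int), (j : Int)), st.2) else st
      else st) (inside, (0 : Int))).1) PySem.Set.empty

-- ===== PORT B =====
-- crossings = [j for j, tile in enumerate(row) if tile in "|LJ"]
def pvCrossings (cs : List Char) : List Int :=
  ((List.range cs.length).filter (fun j => pvIsCross (cs.getD j ' '))).map (fun (j : Nat) => (j : Int))

-- Source B's hand-written _bisect_left is the textbook lo/hi loop = PySem.List.bisectLeft.
def find_inside_characters_alt (pipes : List String) : List (Int × Int) :=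
  (List.range pipes.length).foldl (fun (inside : PySem.Set (Int × Int)) i =>
    let cs := (pipes.getD i "").toList
    (List.range cs.length).foldl (fun inside j =>
      if cs.getD j ' ' = '.' ∧ PySem.List.bisectLeft (pvCrossings cs) ((j : Int)) % 2 = 1
      then PySem.Set.add inside ((i : Int), (j : Int)) else inside) inside) PySem.Set.empty

-- ===== PRECONDITION & SPEC =====
def Spec_find_inside_characters (pipes : List String) (out : List (Int × Int)) : Prop := out = find_inside_characters_alt pipes
instance (pipes : List String) (out : List (Int × Int)) : Decidable (Spec_find_inside_characters pipes out) := by unfold Spec_find_inside_characters; infer_instance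

-- ===== CLAIM (what is proved, stated in full; the proofs are below) =====
def Claim_equal_find_inside_characters : Prop := ∀ (pipes : List String), Dom_find_inside_characters pipes → Spec_find_inside_characters pipes (find_inside_characters pipes)

-- ===== LEMMAS AND PROOFS =====
-- number of crossing tiles among columns 0..m-1 of the row
def pvCnt (cs : List Char) (m : Nat) : Nat :=
  ((List.range m).filter (fun j => pvIsCross (cs.getD j ' '))).length

lemma pvCrossings_split (cs : List Char) (m : Nat) (hm : m ≤ cs.length) :
    pvCrossings cs =
      ((List.range m).filter (fun j => pvIsCross (cs.getD j ' '))).map (fun (j : Nat) => (j : Int)) ++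
      (((List.range (cs.length - m)).map (fun t => m + t)).filter
        (fun j => pvIsCross (cs.getD j ' '))).map (fun (j : Nat) => (j : Int)) := by
  unfold pvCrossings
  rw [show cs.length = m + (cs.length - m) from by omega, List.range_add, List.filter_append,
    List.map_append, Nat.add_sub_cancel_left]

lemma pvCrossings_sorted (cs : List Char) : (pvCrossings cs).Pairwise (· ≤ ·) := by
  unfold pvCrossings
  rw [List.pairwise_map]
  exact (List.pairwise_lt_range.filter _).imp (fun h => by exact_mod_cast Nat.le_of_lt h)

lemma pvBisect_eq (cs : List Char) (m : Nat) (hm : m ≤ cs.length) :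
    PySem.List.bisectLeft (pvCrossings cs) (m : Int) = pvCnt cs m := by
  obtain ⟨h1, h2, h3⟩ := PySem.List.bisectLeft_spec (pvCrossings cs) (m : Int) (pvCrossings_sorted cs)
  have hsplit := pvCrossings_split cs m hm
  have hA1len : (((List.range m).filter (fun j => pvIsCross (cs.getD j ' '))).map
      (fun (j : Nat) => (j : Int))).length = pvCnt cs m := by simp [pvCnt]
  have hlen : pvCnt cs m ≤ (pvCrossings cs).length := by
    rw [hsplit, List.length_append, hA1len]; omega
  have hmem1 : ∀ x ∈ ((List.range m).filter (fun j => pvIsCross (cs.getD j ' '))).map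
      (fun (j : Nat) => (j : Int)), x < (m : Int) := by
    intro x hx
    simp only [List.mem_map, List.mem_filter, List.mem_range] at hx
    obtain ⟨j, ⟨hj, -⟩, rfl⟩ := hx
    exact_mod_cast hj
  have hmem2 : ∀ x ∈ (((List.range (cs.length - m)).map (fun t => m + t)).filter
      (fun j => pvIsCross (cs.getD j ' '))).map (fun (j : Nat) => (j : Int)), (m : Int) ≤ x := by
    intro x hx
    simp only [List.mem_map, List.mem_filter, List.mem_range] at hx
    obtain ⟨j, ⟨hj, -⟩, rfl⟩ := hx
    obtain ⟨t, -, rfl⟩ := hj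
    exact_mod_cast Nat.le_add_right m t
  rcases lt_trichotomy (PySem.List.bisectLeft (pvCrossings cs) (m : Int)) (pvCnt cs m) with hlt | heq | hgt
  · exfalso
    have hrlen : PySem.List.bisectLeft (pvCrossings cs) (m : Int) < (pvCrossings cs).length :=
      lt_of_lt_of_le hlt hlen
    have hge := h3 _ hrlen le_rfl
    have hel : (pvCrossings cs)[PySem.List.bisectLeft (pvCrossings cs) (m : Int)]'hrlen ∈
        ((List.range m).filter (fun j => pvIsCross (cs.getD j ' '))).map (fun (j : Nat) => (j : Int)) := by
      rw [List.getElem_of_eq hsplit, List.getElem_append_left (by rw [hA1len]; exact hlt)]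
      exact List.getElem_mem _
    have := hmem1 _ hel
    omega
  · exact heq
  · exfalso
    have hclen : pvCnt cs m < (pvCrossings cs).length := lt_of_lt_of_le hgt h1
    have hltm := h2 _ hclen hgt
    have hel : (pvCrossings cs)[pvCnt cs m]'hclen ∈
        (((List.range (cs.length - m)).map (fun t => m + t)).filter
          (fun j => pvIsCross (cs.getD j ' '))).map (fun (j : Nat) => (j : Int)) := by
      rw [List.getElem_of_eq hsplit, List.getElem_append_right (le_of_eq hA1len)]
      exact List.getElem_mem _
    have := hmem2 _ hel
    omega

lemma pvRow (i : Nat) (cs : List Char) (m : Nat) (hm : m ≤ cs.length)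
    (inside : PySem.Set (Int × Int)) :
    (List.range m).foldl (fun (st : PySem.Set (Int × Int) × Int) j =>
      if pvIsCross (cs.getD j ' ') then (st.1, st.2 + 1)
      else if cs.getD j ' ' = '.' then
        if PySem.Int.mod st.2 2 ≠ 0 then (PySem.Set.add st.1 ((i : Int), (j : Int)), st.2) else st
      else st) (inside, (0 : Int))
    = ((List.range m).foldl (fun inside j =>
        if cs.getD j ' ' = '.' ∧ PySem.List.bisectLeft (pvCrossings cs) ((j : Int)) % 2 = 1
        then PySem.Set.add inside ((i : Int), (j : Int)) else inside) inside,
       (pvCnt cs m : Int)) := by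
  induction m with
  | zero => simp [pvCnt]
  | succ m ih =>
    have hm' : m ≤ cs.length := by omega
    rw [List.range_succ, List.foldl_append, List.foldl_append, ih hm']
    simp only [List.foldl_cons, List.foldl_nil]
    have hb : PySem.List.bisectLeft (pvCrossings cs) (m : Int) = pvCnt cs m :=
      pvBisect_eq cs m hm'
    by_cases hc : pvIsCross (cs[m]?.getD ' ')
    · have hdot : ¬ (cs[m]?.getD ' ' = '.') := by
        intro h; rw [h] at hc; simp [pvIsCross] at hc
      have hcnt : pvCnt cs (m + 1) = pvCnt cs m + 1 := by
        unfold pvCnt; rw [List.range_succ, List.filter_append]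
        simp [List.getD_eq_getElem?_getD, hc]
      simp [List.getD_eq_getElem?_getD, hc, hdot, hcnt]
    · have hcnt : pvCnt cs (m + 1) = pvCnt cs m := by
        unfold pvCnt; rw [List.range_succ, List.filter_append]
        simp [List.getD_eq_getElem?_getD, hc]
      by_cases hd : cs[m]?.getD ' ' = '.'
      · have hdotf : pvIsCross '.' = false := by decide
        have hpar : (((pvCnt cs m : Int)) % 2 = 1) ↔ (pvCnt cs m % 2 = 1) := by omega
        by_cases hp : pvCnt cs m % 2 = 1
        · simp [List.getD_eq_getElem?_getD, hd, hb, hcnt, hpar, hp, hdotf]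
        · simp [List.getD_eq_getElem?_getD, hd, hb, hcnt, hpar, hp, hdotf]
      · simp [List.getD_eq_getElem?_getD, hc, hd, hcnt]

-- ===== VERDICT (by name: the statement is the Claim_ definition above) =====
theorem find_inside_characters_spec : Claim_equal_find_inside_characters := by
  intro pipes _
  unfold Spec_find_inside_characters find_inside_characters find_inside_characters_alt
  refine PySem.List.foldl_congr_mem _ _ _ _ ?_
  intro acc i _
  dsimp only
  rw [pvRow i ((pipes.getD i "").toList) ((pipes.getD i "").toList).length le_rfl acc]
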